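-- pv_equiv track=rewrite | github.com/junnei/codetree-TILs | 240205/순위 경쟁/ranking-competition.py | check_rank
-- ===== SOURCE A (Python) =====
-- def check_rank(score):
--     max_val = max(score)
--     num = score.count(max_val)
--     if num == 1:
--         return 1 + score.index(max_val)
--     elif num == 2:
--         i = 0
--         for idx, val in enumerate(score):
--             if val != max_val:
--                 i = idx
--         return 4 + i
--     else:
--         return 0
-- ===== SOURCE B (Python) =====
-- def check_rank(score):
--     pairs = sorted(enumerate(score), key=lambda p: p[1], reverse=True)
--     top_idx, max_val = pairs[0]
--     if len(pairs) == 1 or pairs[1][1] != max_val: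
--         return 1 + top_idx
--     if len(pairs) == 2 or pairs[2][1] != max_val:
--         return 4 + max((i for i, _ in pairs[2:]), default=0)
--     return 0
-- ===== Notes on version B (the rewrite author's own statement) =====
-- stated objective: alternative
-- what changed: B sorts the index/value pairs by value in descending stable order, reads the winner from the head, decides the max-multiplicity by inspecting only the second and third sorted entries, and takes max() of the remaining indices for the two-way tie case, instead of A's count/index library scans and explicit last-non-max loop.
import Mathlib
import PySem

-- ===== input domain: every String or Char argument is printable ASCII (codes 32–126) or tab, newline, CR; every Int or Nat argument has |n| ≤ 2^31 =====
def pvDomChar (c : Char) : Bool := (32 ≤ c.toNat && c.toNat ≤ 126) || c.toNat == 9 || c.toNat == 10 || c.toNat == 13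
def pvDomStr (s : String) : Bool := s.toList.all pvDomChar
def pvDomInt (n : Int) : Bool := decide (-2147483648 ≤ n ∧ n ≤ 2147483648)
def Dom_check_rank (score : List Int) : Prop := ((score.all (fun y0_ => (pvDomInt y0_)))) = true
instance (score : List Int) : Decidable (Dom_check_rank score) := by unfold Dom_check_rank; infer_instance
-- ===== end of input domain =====

-- B re-solves the task by stable descending sort of (index, value) pairs: the winner is the head, the multiplicity of the max is read off the second/third entries, and the tie case takes max() over the remaining indices (alternative algorithm, O(n log n) vs A's O(n) scans).


-- ===== PORT A =====
def check_rank (score : List Int) : Int :=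
  match PySem.List.max? score (fun y => y) with
  | none => 0   -- unreachable under Pre_: max([]) raises ValueError
  | some max_val =>
    let num := PySem.List.count score max_val
    if num = 1 then
      match PySem.List.index? score max_val with
      | some k => 1 + (k : Int)
      | none => 0   -- unreachable: max_val ∈ score
    else if num = 2 then
      let i := (PySem.List.enumerate score 0).foldl
        (fun i p => if p.2 ≠ max_val then p.1 else i) 0
      4 + i
    else 0

-- ===== PORT B =====
def check_rank_alt (score : List Int) : Int :=
  match PySem.List.sorted (PySem.List.enumerate score 0) (fun p => p.2) true with
  | [] => 0   -- unreachable under Pre_: pairs[0] raises IndexError on the empty list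
  | (top_idx, max_val) :: rest =>
    match rest with
    | [] => 1 + top_idx                -- len(pairs) == 1
    | (_, v1) :: rest2 =>
      if v1 ≠ max_val then 1 + top_idx -- pairs[1][1] != max_val
      else
        match rest2 with
        | [] => 4 + PySem.List.maxD (rest2.map Prod.fst) (fun i => i) 0   -- len(pairs) == 2
        | (_, v2) :: _ =>
          if v2 ≠ max_val then 4 + PySem.List.maxD (rest2.map Prod.fst) (fun i => i) 0
          else 0

-- ===== PRECONDITION & SPEC =====
-- Pre_ excludes only the empty list, on which A's max(score) raises ValueError (B raises IndexError there too).
def Pre_check_rank (score : List Int) : Prop := score ≠ []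
instance (score : List Int) : Decidable (Pre_check_rank score) := by unfold Pre_check_rank; infer_instance
def pvWitness_check_rank : List Int := [3, 7, 7, 1]

def Spec_check_rank (score : List Int) (out : Int) : Prop := out = check_rank_alt score
instance (score : List Int) (out : Int) : Decidable (Spec_check_rank score out) := by unfold Spec_check_rank; infer_instance

-- ===== CLAIM (what is proved, stated in full; the proofs are below) =====
def Claim_equal_check_rank : Prop := ∀ (score : List Int), Dom_check_rank score → Pre_check_rank score → Spec_check_rank score (check_rank score)

-- ===== LEMMAS AND PROOFS =====

-- two distinct elements both satisfying p force countP ≥ 2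
theorem pv_countP_two {α : Type} {p : α → Bool} {l : List α} {a b : α}
    (ha : a ∈ l) (hb : b ∈ l) (hab : a ≠ b) (hpa : p a) (hpb : p b) :
    2 ≤ l.countP p := by
  obtain ⟨s, t, rfl⟩ := List.append_of_mem ha
  rw [List.countP_append, List.countP_cons]
  rcases List.mem_append.mp hb with hbs | hbt
  · have h1 : 0 < s.countP p := List.countP_pos_iff.mpr ⟨b, hbs, hpb⟩
    simp [hpa]; omega
  · rcases List.mem_cons.mp hbt with rfl | hbt'
    · exact absurd rfl (Ne.symm hab)
    · have h1 : 0 < t.countP p := List.countP_pos_iff.mpr ⟨b, hbt', hpb⟩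
      simp [hpa]; omega

-- a "keep the last index" fold over a strictly fst-increasing list is the max of the indices
theorem pv_lastFst_eq_foldl_max (l : List (Int × Int)) :
    ∀ a : Int, (∀ q ∈ l, a ≤ q.1) → l.Pairwise (fun p q => p.1 < q.1) →
      l.foldl (fun _ p => p.1) a = (l.map Prod.fst).foldl max a := by
  induction l with
  | nil => intro a _ _; rfl
  | cons q t ih =>
    intro a hle hpw
    simp only [List.foldl_cons, List.map_cons]
    rw [max_eq_right (hle q (List.mem_cons_self))]
    exact ih q.1 (fun r hr => le_of_lt ((List.pairwise_cons.mp hpw).1 r hr))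
      (List.pairwise_cons.mp hpw).2

-- max(xs, default=0) on a list of nonnegative ints is the running max from 0
theorem pv_maxD_eq_foldl_max (l : List Int) (h : ∀ y ∈ l, 0 ≤ y) :
    PySem.List.maxD l (fun i => i) 0 = l.foldl max 0 := by
  cases l with
  | nil => rfl
  | cons x t =>
    simp only [PySem.List.maxD, PySem.List.max?_id_cons, Option.getD_some, List.foldl_cons]
    rw [max_eq_right (h x (List.mem_cons_self))]

-- the unique position of m (when it occurs exactly once among the enumerated pairs)
theorem pv_index_of_unique (score : List Int) (m i0 : Int)
    (hc : (PySem.List.enumerate score 0).countP (fun q => q.2 == m) = 1)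
    (hmem : (i0, m) ∈ PySem.List.enumerate score 0) :
    ∃ k : Nat, PySem.List.index? score m = some k ∧ i0 = (k : Int) := by
  obtain ⟨k', hk', hpk'⟩ := (PySem.List.mem_enumerate_iff score 0 (i0, m)).mp hmem
  have hmscore : m ∈ score := by
    have : score[k'] = m := (Prod.mk.injEq _ _ _ _ ▸ hpk').2.symm
    exact this ▸ List.getElem_mem hk'
  obtain ⟨j0, hj0⟩ := Option.isSome_iff_exists.mp
    ((PySem.List.index?_isSome_iff score m).mpr hmscore)
  obtain ⟨hj0lt, hj0get, _⟩ := PySem.List.getElem_of_index?_eq_some hj0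
  refine ⟨j0, hj0, ?_⟩
  have hmem2 : ((j0 : Int), m) ∈ PySem.List.enumerate score 0 :=
    (PySem.List.mem_enumerate_iff score 0 _).mpr ⟨j0, hj0lt, by simp [hj0get]⟩
  by_contra hne
  have : (2 : Nat) ≤ (PySem.List.enumerate score 0).countP (fun q => q.2 == m) :=
    pv_countP_two hmem hmem2 (by simp [Prod.ext_iff]; omega) (by simp) (by simp)
  omega

-- ===== VERDICT (by name: the statement is the Claim_ definition above) =====
theorem check_rank_spec : Claim_equal_check_rank := by
  intro score _ hpre
  unfold Pre_check_rank at hpre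
  unfold Spec_check_rank check_rank check_rank_alt
  rcases score with _ | ⟨x, t⟩
  · exact absurd rfl hpre
  rw [PySem.List.max?_id_cons]
  set m := t.foldl max x with hm
  have hm_mem : m ∈ x :: t := by
    rcases PySem.List.foldl_max_mem t x with h | h
    · exact h ▸ List.mem_cons_self
    · exact List.mem_cons_of_mem _ h
  have hm_le : ∀ y ∈ x :: t, y ≤ m := by
    intro y hy
    rcases List.mem_cons.mp hy with rfl | hy'
    · exact (PySem.List.le_foldl_max t y).1
    · exact (PySem.List.le_foldl_max t x).2 y hy'
  set e := PySem.List.enumerate (x :: t) 0 with he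
  have hmap : e.map (·.2) = x :: t := PySem.List.map_snd_enumerate (x :: t) 0
  have hsnd : ∀ q ∈ e, q.2 ≤ m := by
    intro q hq
    exact hm_le q.2 (hmap ▸ List.mem_map_of_mem hq)
  have hfst : ∀ q ∈ e, 0 ≤ q.1 := by
    intro q hq
    obtain ⟨k, hk, rfl⟩ := (PySem.List.mem_enumerate_iff _ _ _).mp hq
    simp
  have hcount : PySem.List.count (x :: t) m = e.countP (fun q => q.2 == m) := by
    rw [PySem.List.count_eq, ← hmap, List.count_eq_countP, List.countP_map]
    rfl
  rcases hsorted : PySem.List.sorted e (fun p => p.2) true with _ | ⟨⟨i0, v0⟩, rest⟩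
  · exfalso
    have := (PySem.List.sorted_eq_nil_iff (xs := e) (key := fun p => p.2) (rev := true)).mp hsorted
    simp [he, PySem.List.enumerate_cons] at this
  have hperm : ((i0, v0) :: rest).Perm e := hsorted ▸ PySem.List.sorted_perm e (fun p => p.2) true
  have hpw : ((i0, v0) :: rest).Pairwise (fun a b => b.2 ≤ a.2) :=
    hsorted ▸ PySem.List.sorted_pairwise_rev e (fun p => p.2)
  have hhead_mem : (i0, v0) ∈ e := hperm.subset List.mem_cons_self
  have hv0 : v0 = m := by
    refine le_antisymm (hsnd _ hhead_mem) ?_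
    have : ∃ q ∈ e, q.2 = m := by
      have : m ∈ e.map (·.2) := hmap ▸ hm_mem
      obtain ⟨q, hq, hq2⟩ := List.mem_map.mp this
      exact ⟨q, hq, hq2⟩
    obtain ⟨q, hq, hq2⟩ := this
    exact hq2 ▸ PySem.List.key_head_sorted_rev_ge e (fun p => p.2) hsorted q hq
  subst hv0
  have hcountp : e.countP (fun q => q.2 == m) = ((i0, m) :: rest).countP (fun q => q.2 == m) :=
    (hperm.countP_eq _).symm
  have hrest_mem : ∀ q ∈ rest, q ∈ e := fun q hq => hperm.subset (List.mem_cons_of_mem _ hq)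
  rcases rest with _ | ⟨⟨i1, v1⟩, rest2⟩
  · -- sorted list is a single pair: score has one element, which is the max
    have hnum : PySem.List.count (x :: t) m = 1 := by
      rw [hcount, hcountp]; simp
    dsimp only
    rw [hnum]
    obtain ⟨k, hk, hik⟩ := pv_index_of_unique (x :: t) m i0 (by rw [← hcount, hnum]) hhead_mem
    rw [hk, hik]
    simp
  have h1mem : (i1, v1) ∈ e := hrest_mem _ List.mem_cons_self
  have hv1le : v1 ≤ m := hsnd _ h1mem
  by_cases hv1 : v1 = m
  · subst hv1
    -- at least two maxima
    rcases rest2 with _ | ⟨⟨i2, v2⟩, rest3⟩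
    · -- exactly two pairs total: count = 2, no non-max element anywhere
      have hnum : PySem.List.count (x :: t) m = 2 := by
        rw [hcount, hcountp]; simp
      dsimp only
      rw [hnum]
      rw [if_neg (by norm_num), if_pos rfl, if_neg (by simp)]
      have hfilter : e.filter (fun q => decide (q.2 ≠ m)) = [] := by
        have hp := hperm.filter (fun q => decide (q.2 ≠ m))
        norm_num at hp
        exact List.filter_eq_nil_iff.mpr (fun q hq => by simpa using hp q.1 q.2 hq)
      rw [PySem.List.foldl_ite_eq_foldl_filter (fun q => q.2 ≠ m) (fun _ p => p.1) e 0, hfilter]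
      simp [PySem.List.maxD, PySem.List.max?]
    have h2mem : (i2, v2) ∈ e := hrest_mem _ (List.mem_cons_of_mem _ List.mem_cons_self)
    have hv2le : v2 ≤ m := hsnd _ h2mem
    by_cases hv2 : v2 = m
    · -- three or more maxima: both return 0
      subst hv2
      have hnum : 3 ≤ PySem.List.count (x :: t) m := by
        rw [hcount, hcountp]
        simp only [List.countP_cons]
        simp
      have h1 : PySem.List.count (x :: t) m ≠ 1 := by omega
      have h2 : PySem.List.count (x :: t) m ≠ 2 := by omega
      dsimp only
      rw [if_neg h1, if_neg h2]
      simp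
    · -- exactly two maxima, with at least one other element
      have hlt : ∀ q ∈ (i2, v2) :: rest3, q.2 < m := by
        intro q hq
        have hle2 : q.2 ≤ v2 := by
          rcases List.mem_cons.mp hq with rfl | hq'
          · exact le_refl _
          · have := hpw
            simp only [List.pairwise_cons] at this
            exact (this.2.2.1) q hq'
        have : v2 < m := lt_of_le_of_ne hv2le hv2
        omega
      have hz : ((i2, v2) :: rest3).countP (fun q => q.2 == m) = 0 := by
        rw [List.countP_eq_zero]
        intro q hq
        simp only [beq_iff_eq]
        exact ne_of_lt (hlt q hq)
      have hnum : PySem.List.count (x :: t) m = 2 := by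
        rw [hcount, hcountp, List.countP_cons, List.countP_cons, hz]
        simp
      dsimp only
      rw [hnum]
      rw [if_neg (by norm_num), if_pos rfl, if_neg (by simp), if_pos hv2]
      -- A's last-non-max loop = max of the indices of the non-max pairs = B's max()
      have hfilter : (e.filter (fun q => decide (q.2 ≠ m))).Perm ((i2, v2) :: rest3) := by
        have hp := (hperm.filter (fun q => decide (q.2 ≠ m))).symm
        have heq : ((i0, m) :: (i1, m) :: (i2, v2) :: rest3).filter (fun q => decide (q.2 ≠ m))
            = (i2, v2) :: rest3 := by
          rw [List.filter_cons_of_neg (by simp), List.filter_cons_of_neg (by simp),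
            List.filter_cons_of_pos (by simpa using hv2),
            List.filter_eq_self.mpr
              (fun q hq => by simpa using ne_of_lt (hlt q (List.mem_cons_of_mem _ hq)))]
        rw [heq] at hp
        exact hp
      rw [PySem.List.foldl_ite_eq_foldl_filter (fun q => q.2 ≠ m) (fun _ p => p.1) e 0]
      rw [pv_lastFst_eq_foldl_max _ 0 (fun q hq => hfst q (List.mem_of_mem_filter hq))
        ((PySem.List.pairwise_lt_enumerate (x :: t) 0).filter _)]
      rw [pv_maxD_eq_foldl_max _ (by
        intro y hy
        rcases List.mem_cons.mp hy with rfl | hy'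
        · exact hfst _ h2mem
        · obtain ⟨q, hq, rfl⟩ := List.mem_map.mp hy'
          exact hfst q (hrest_mem _ (List.mem_cons_of_mem _ (List.mem_cons_of_mem _ hq))))]
      exact congrArg (4 + ·) ((hfilter.map Prod.fst).foldl_op_eq (op := max) (a := (0 : Int)))
  · -- second sorted value below the max: the max is unique
    have hlt2 : ∀ q ∈ (i1, v1) :: rest2, q.2 < m := by
      intro q hq
      have hle1 : q.2 ≤ v1 := by
        rcases List.mem_cons.mp hq with rfl | hq'
        · exact le_refl _
        · have := hpw
          simp only [List.pairwise_cons] at this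
          exact this.2.1 q hq'
      have : v1 < m := lt_of_le_of_ne hv1le hv1
      omega
    have hz : ((i1, v1) :: rest2).countP (fun q => q.2 == m) = 0 := by
      rw [List.countP_eq_zero]
      intro q hq
      simp only [beq_iff_eq]
      exact ne_of_lt (hlt2 q hq)
    have hnum : PySem.List.count (x :: t) m = 1 := by
      rw [hcount, hcountp, List.countP_cons, hz]
      simp
    dsimp only
    rw [hnum]
    rw [if_pos hv1]
    obtain ⟨k, hk, hik⟩ := pv_index_of_unique (x :: t) m i0 (by rw [← hcount, hnum]) hhead_mem
    rw [hk, hik]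
    simp
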